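-- pv_equiv track=rewrite | github.com/elsieoduor/phase-3-week1codechallenge | Constant.py | highest_consonant
-- ===== SOURCE A (Python) =====
-- def get_consonant(c):
--     return ord(c) - ord('a') + 1
--
-- def highest_consonant(s):
--     max_value = 0
--     current_value = 0
--
--     for char in s:
--         if char not in "aeiou":
--             current_value += get_consonant(char)
--             max_value = max(max_value, current_value)
--         else:
--             current_value = 0
--
--     return max_value
-- ===== SOURCE B (Python) =====
-- def _consonant_runs(s):
--     runs = []
--     run = []
--     for c in s:
--         if c in "aeiou":
--             runs.append(run)
--             run = []
--         else:
--             run.append(c)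
--     runs.append(run)
--     return runs
--
-- def highest_consonant(s):
--     best = 0
--     for run in _consonant_runs(s):
--         prefix = 0
--         for c in run:
--             prefix += ord(c) - ord('a') + 1
--             if prefix > best:
--                 best = prefix
--     return best
-- ===== Notes on version B (the rewrite author's own statement) =====
-- stated objective: alternative
-- what changed: Replaces the flat Kadane-style scan carrying a reset accumulator by a two-phase decomposition: first split the string into maximal consonant runs (vowels as separators), then take the maximum prefix sum within each run.
import Mathlib
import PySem

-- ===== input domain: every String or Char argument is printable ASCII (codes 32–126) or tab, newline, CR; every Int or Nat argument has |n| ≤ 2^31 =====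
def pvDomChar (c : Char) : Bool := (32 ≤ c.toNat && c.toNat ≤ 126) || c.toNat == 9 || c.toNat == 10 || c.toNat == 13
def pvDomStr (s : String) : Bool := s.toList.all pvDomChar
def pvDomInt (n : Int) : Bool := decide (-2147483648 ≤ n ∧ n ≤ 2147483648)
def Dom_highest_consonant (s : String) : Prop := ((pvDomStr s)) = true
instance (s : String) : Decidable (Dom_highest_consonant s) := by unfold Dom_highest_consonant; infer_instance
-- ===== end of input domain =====

-- B replaces A's flat reset-accumulator scan by a two-phase decomposition (split into
-- consonant runs, then per-run maximum prefix sum); alternative structure, same cost.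


-- ===== PORT A =====
def get_consonant (c : Char) : Int := (c.toNat : Int) - ('a'.toNat : Int) + 1

def highest_consonant (s : String) : Int :=
  (s.toList.foldl
    (fun (st : Int × Int) char =>
      if !("aeiou".toList.contains char) then
        (max st.1 (st.2 + get_consonant char), st.2 + get_consonant char)
      else
        (st.1, 0))
    (0, 0)).1

-- ===== PORT B =====
-- mirrors Source B's _consonant_runs: accumulate (runs, run), flush on vowels, append the last run
def pvConsRuns (l : List Char) : List (List Char) :=
  let p := l.foldl
    (fun (st : List (List Char) × List Char) c =>
      if "aeiou".toList.contains c then (st.1 ++ [st.2], [])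
      else (st.1, st.2 ++ [c]))
    ([], [])
  p.1 ++ [p.2]

def highest_consonant_alt (s : String) : Int :=
  (pvConsRuns s.toList).foldl
    (fun best run =>
      (run.foldl
        (fun (q : Int × Int) c =>
          let pr := q.2 + ((c.toNat : Int) - ('a'.toNat : Int) + 1)
          (if pr > q.1 then pr else q.1, pr))
        (best, 0)).1)
    0

-- ===== PRECONDITION & SPEC =====
def Spec_highest_consonant (s : String) (out : Int) : Prop := out = highest_consonant_alt s
instance (s : String) (out : Int) : Decidable (Spec_highest_consonant s out) := by unfold Spec_highest_consonant; infer_instance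

-- ===== CLAIM (what is proved, stated in full; the proofs are below) =====
def Claim_equal_highest_consonant : Prop := ∀ (s : String), Dom_highest_consonant s → Spec_highest_consonant s (highest_consonant s)

-- ===== LEMMAS AND PROOFS =====

-- shared step on a (best, prefix) state
def iStep (q : Int × Int) (c : Char) : Int × Int :=
  (max q.1 (q.2 + get_consonant c), q.2 + get_consonant c)

def isVowel (c : Char) : Bool := "aeiou".toList.contains c

-- A's step written with iStep
lemma aStep_eq (st : Int × Int) (c : Char) :
    (if !("aeiou".toList.contains c) then
        (max st.1 (st.2 + get_consonant c), st.2 + get_consonant c)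
      else (st.1, 0))
    = (if isVowel c then (st.1, 0) else iStep st c) := by
  simp only [isVowel, iStep]
  by_cases h : ("aeiou".toList.contains c) = true
  · rw [h]; simp
  · rw [Bool.not_eq_true] at h; rw [h]; simp

-- B's inner step equals iStep
lemma bStep_eq (q : Int × Int) (c : Char) :
    (let pr := q.2 + ((c.toNat : Int) - ('a'.toNat : Int) + 1)
     ((if pr > q.1 then pr else q.1 : Int), pr)) = iStep q c := by
  show ((if q.2 + ((c.toNat : Int) - ('a'.toNat : Int) + 1) > q.1
          then q.2 + ((c.toNat : Int) - ('a'.toNat : Int) + 1) else q.1 : Int),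
        q.2 + ((c.toNat : Int) - ('a'.toNat : Int) + 1)) = iStep q c
  unfold iStep get_consonant
  simp only [Prod.mk.injEq]
  refine ⟨?_, trivial⟩
  split_ifs <;> omega

lemma aStepFun_eq :
    (fun (st : Int × Int) char =>
      if !("aeiou".toList.contains char) then
        (max st.1 (st.2 + get_consonant char), st.2 + get_consonant char)
      else
        (st.1, 0))
    = (fun (st : Int × Int) c => if isVowel c then (st.1, 0) else iStep st c) := by
  funext st c
  exact aStep_eq st c

lemma bStepFun_eq :
    (fun (q : Int × Int) (c : Char) =>
      let pr := q.2 + ((c.toNat : Int) - ('a'.toNat : Int) + 1)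
      ((if pr > q.1 then pr else q.1 : Int), pr)) = iStep := by
  funext q c
  exact bStep_eq q c

lemma modifyHead_self {α : Type} (xs : List α) : xs.modifyHead (fun h => h) = xs := by
  cases xs <;> rfl

-- the per-run combinator of B
def gRun (b : Int) (run : List Char) : Int := (run.foldl iStep (b, 0)).1

-- splitting into consonant runs, structurally
def splitRuns : List Char → List (List Char)
  | [] => [[]]
  | x :: t =>
      if isVowel x then [] :: splitRuns t
      else
        match splitRuns t with
        | [] => [[x]]          -- unreachable: splitRuns is never empty
        | h :: r => (x :: h) :: r

lemma splitRuns_ne_nil (l : List Char) : splitRuns l ≠ [] := by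
  cases l with
  | nil => simp [splitRuns]
  | cons x t =>
      simp only [splitRuns]
      split
      · simp
      · split <;> simp

-- Source B's accumulator-built runs equal splitRuns
lemma consRuns_acc (l : List Char) :
    ∀ (out : List (List Char)) (run : List Char),
      (l.foldl
        (fun (st : List (List Char) × List Char) c =>
          if "aeiou".toList.contains c then (st.1 ++ [st.2], [])
          else (st.1, st.2 ++ [c]))
        (out, run)).1
      ++ [(l.foldl
        (fun (st : List (List Char) × List Char) c =>
          if "aeiou".toList.contains c then (st.1 ++ [st.2], [])
          else (st.1, st.2 ++ [c]))
        (out, run)).2]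
      = out ++ (splitRuns l).modifyHead (fun h => run ++ h) := by
  induction l with
  | nil => intro out run; simp [splitRuns]
  | cons x t ih =>
      intro out run
      by_cases hv : ("aeiou".toList.contains x) = true
      · simp only [List.foldl_cons, if_pos, splitRuns, isVowel, hv, if_true]
        rw [ih]
        simp [modifyHead_self]
      · simp only [List.foldl_cons, if_neg, Bool.false_eq_true, not_false_iff, splitRuns,
          isVowel, hv, if_false]
        rw [ih]
        rcases h : splitRuns t with _ | ⟨hd, r⟩
        · exact absurd h (splitRuns_ne_nil t)
        · simp

lemma pvConsRuns_eq (l : List Char) : pvConsRuns l = splitRuns l := by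
  have := consRuns_acc l [] []
  simpa [pvConsRuns, modifyHead_self] using this

-- A's scan as a tail recursion
def aGo : List Char → Int → Int → Int
  | [], m, _ => m
  | x :: t, m, c =>
      if isVowel x then aGo t m 0
      else aGo t (max m (c + get_consonant x)) (c + get_consonant x)

lemma aFold_eq_aGo (l : List Char) : ∀ m c : Int,
    (l.foldl (fun st ch => if isVowel ch then (st.1, 0) else iStep st ch) (m, c)).1
      = aGo l m c := by
  induction l with
  | nil => intro m c; simp [aGo]
  | cons x t ih =>
      intro m c
      by_cases h : isVowel x
      · simp [aGo, h, ih]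
      · simp only [List.foldl_cons, aGo, h, Bool.false_eq_true, if_false]
        exact ih _ _

-- the bridge: B's outer fold continued from mid-run state (m, c) equals A's scan
def bCont (m c : Int) : List (List Char) → Int
  | [] => m
  | h :: t => t.foldl gRun (h.foldl iStep (m, c)).1

lemma bCont_zero (rs : List (List Char)) (m : Int) :
    bCont m 0 rs = rs.foldl gRun m := by
  cases rs with
  | nil => rfl
  | cons h t => simp [bCont, gRun]

lemma aGo_eq_bCont (l : List Char) : ∀ m c : Int,
    aGo l m c = bCont m c (splitRuns l) := by
  induction l with
  | nil => intro m c; simp [aGo, splitRuns, bCont]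
  | cons x t ih =>
      intro m c
      by_cases h : isVowel x
      · simp only [aGo, h, if_pos, splitRuns, if_true]
        rw [ih, bCont]
        simp [List.foldl_nil, ← bCont_zero]
      · simp only [aGo, h, if_neg, Bool.false_eq_true, not_false_iff, splitRuns, if_false]
        rcases hs : splitRuns t with _ | ⟨hd, r⟩
        · exact absurd hs (splitRuns_ne_nil t)
        · rw [ih, hs]
          simp [bCont, iStep]

-- rewrite the two ports into the bridge form
lemma portA_eq (s : String) : highest_consonant s = aGo s.toList 0 0 := by
  rw [highest_consonant, aStepFun_eq, aFold_eq_aGo]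

lemma portB_eq (s : String) :
    highest_consonant_alt s = (splitRuns s.toList).foldl gRun 0 := by
  rw [highest_consonant_alt, pvConsRuns_eq]
  have h : (fun (best : Int) (run : List Char) =>
      (run.foldl
        (fun (q : Int × Int) c =>
          let pr := q.2 + ((c.toNat : Int) - ('a'.toNat : Int) + 1)
          (if pr > q.1 then pr else q.1, pr))
        (best, 0)).1) = gRun := by
    funext best run
    rw [gRun, bStepFun_eq]
  rw [h]

-- ===== VERDICT (by name: the statement is the Claim_ definition above) =====
theorem highest_consonant_spec : Claim_equal_highest_consonant := by
  intro s _
  show highest_consonant s = highest_consonant_alt s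
  rw [portA_eq, portB_eq, aGo_eq_bCont, bCont_zero]
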